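-- pv_equiv track=rewrite | github.com/bvahsen/obds_training | python_scripts/GC_contents_Charlie.py | count
-- ===== SOURCE A (Python) =====
-- def count(sequence):
--     GC_content = 0
--     for character in sequence:
--         if character == 'G':
--             GC_content = GC_content + 1
--         if character == 'C':
--             GC_content = GC_content + 1
--     return GC_content
-- ===== SOURCE B (Python) =====
-- def count(sequence):
--     freq = {}
--     for character in sequence:
--         freq[character] = freq.get(character, 0) + 1
--     return freq.get('G', 0) + freq.get('C', 0)
-- ===== Notes on version B (the rewrite author's own statement) =====
-- stated objective: alternative
-- what changed: Replaces the inline running GC counter with a tabulate-then-lookup decomposition: build a full character-frequency dictionary once, then sum the 'G' and 'C' entries (defaulting to 0).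
import Mathlib
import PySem

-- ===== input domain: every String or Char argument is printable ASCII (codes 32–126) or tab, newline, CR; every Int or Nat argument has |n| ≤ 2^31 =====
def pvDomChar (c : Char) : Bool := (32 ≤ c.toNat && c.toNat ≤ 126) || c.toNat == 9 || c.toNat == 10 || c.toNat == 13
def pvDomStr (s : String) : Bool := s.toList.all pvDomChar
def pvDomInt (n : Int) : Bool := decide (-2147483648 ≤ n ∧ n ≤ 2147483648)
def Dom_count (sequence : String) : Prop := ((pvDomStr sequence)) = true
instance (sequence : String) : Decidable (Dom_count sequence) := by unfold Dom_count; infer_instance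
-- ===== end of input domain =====

-- B builds a full character-frequency dictionary first and then looks up 'G' and 'C'
-- (tabulate-then-lookup), instead of A's single running counter; same cost, alternative structure.

-- ===== PORT A =====
def count (sequence : String) : Int :=
  sequence.toList.foldl
    (fun GC_content character =>
      let GC_content := if character == 'G' then GC_content + 1 else GC_content
      if character == 'C' then GC_content + 1 else GC_content)
    0

-- ===== PORT B =====
def count_alt (sequence : String) : Int :=
  let freq := sequence.toList.foldl
    (fun d character => d.insert character (d.getD character 0 + 1))
    (PySem.Dict.empty : PySem.Dict Char Int)
  freq.getD 'G' 0 + freq.getD 'C' 0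

-- ===== PRECONDITION & SPEC =====
def Spec_count (sequence : String) (out : Int) : Prop := out = count_alt sequence
instance (sequence : String) (out : Int) : Decidable (Spec_count sequence out) := by unfold Spec_count; infer_instance

-- ===== CLAIM (what is proved, stated in full; the proofs are below) =====
def Claim_equal_count : Prop := ∀ (sequence : String), Dom_count sequence → Spec_count sequence (count sequence)

-- ===== LEMMAS AND PROOFS =====

-- A's loop with two sequential ifs adds, over the whole list, one per 'G' and one per 'C'.
theorem count_foldl_eq (l : List Char) (a : Int) :
    l.foldl
      (fun GC_content character =>
        let GC_content := if character == 'G' then GC_content + 1 else GC_content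
        if character == 'C' then GC_content + 1 else GC_content)
      a = a + l.count 'G' + l.count 'C' := by
  induction l generalizing a with
  | nil => simp
  | cons c l ih =>
    simp only [List.foldl_cons, ih, List.count_cons]
    by_cases hG : c = 'G' <;> by_cases hC : c = 'C' <;>
      simp [hG, hC] <;> push_cast <;> ring

-- ===== VERDICT (by name: the statement is the Claim_ definition above) =====
theorem count_spec : Claim_equal_count := by
  intro sequence _
  unfold Spec_count count count_alt
  simp only [PySem.Dict.getD_foldl_insert_add_one]
  rw [count_foldl_eq]
  simp [PySem.Dict.empty, PySem.Dict.getD, PySem.Dict.get?]
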